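-- pv_equiv track=rewrite | github.com/2021sshah/scratchNeuralNets | nnLab2.py | setWeightsToArrows
-- ===== SOURCE A (Python) =====
-- def setWeightsToArrows(weightsLst, inputsLst): # Global Dictionary
--     weightPosToArrow = {}
--     prevLen = len(inputsLst)
--     for i in range(len(weightsLst)):
--         for j in range(len(weightsLst[i])):
--             weightPosToArrow[(i,j)] = [(i,j%prevLen),(i+1,j//prevLen)] # Prev Layer, Next Layer
--         prevLen = len(weightsLst[i])//prevLen # Update Prev Len
--     return weightPosToArrow
-- ===== SOURCE B (Python) =====
-- def setWeightsToArrows(weightsLst, inputsLst):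
--     # Enumerate each arrow by its ENDPOINTS instead of dividing per weight:
--     # with divisor d, the weights of row i split into full blocks of d (block b
--     # feeds next-layer node b from prev-layer nodes 0..d-1) plus a partial
--     # final block; the weight index is reconstructed as b*d + a, so no per-cell
--     # % or // is needed.
--     res = {}
--     d = len(inputsLst)
--     for i, row in enumerate(weightsLst):
--         q = len(row) // d          # number of full blocks (raises where A raises)
--         r = len(row) - q * d       # size of the partial final block
--         for b in range(q):
--             for a in range(d):
--                 res[(i, b * d + a)] = [(i, a), (i + 1, b)]
--         for a in range(r):
--             res[(i, q * d + a)] = [(i, a), (i + 1, q)]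
--         d = q
--     return res
-- ===== Notes on version B (the rewrite author's own statement) =====
-- stated objective: alternative
-- what changed: Instead of computing j % d and j // d for every weight index, B enumerates each arrow directly by its endpoints: the row splits into full blocks of size d (block b feeds next-layer node b from prev-layer nodes 0..d-1) plus a partial final block, and the weight index is reconstructed as b*d+a, eliminating all per-cell division.
import Mathlib
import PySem

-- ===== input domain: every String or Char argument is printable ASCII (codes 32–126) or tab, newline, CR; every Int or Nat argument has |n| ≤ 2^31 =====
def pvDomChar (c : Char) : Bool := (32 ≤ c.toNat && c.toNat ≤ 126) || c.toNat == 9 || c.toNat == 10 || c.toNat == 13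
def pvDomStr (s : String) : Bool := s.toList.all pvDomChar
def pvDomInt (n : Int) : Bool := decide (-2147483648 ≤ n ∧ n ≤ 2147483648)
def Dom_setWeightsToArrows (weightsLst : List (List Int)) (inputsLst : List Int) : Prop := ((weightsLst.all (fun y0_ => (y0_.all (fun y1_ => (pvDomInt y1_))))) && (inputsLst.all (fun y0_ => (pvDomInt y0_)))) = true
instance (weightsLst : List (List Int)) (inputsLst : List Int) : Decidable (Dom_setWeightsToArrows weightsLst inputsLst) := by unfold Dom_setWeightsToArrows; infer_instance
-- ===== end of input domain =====

-- B enumerates each arrow by its endpoints (full blocks of size d plus a partial final block),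
-- reconstructing the weight index as b*d+a, so A's per-cell % and // disappear; same cost,
-- a different algorithm for the same mapping.

-- ===== PORT A =====
def setWeightsToArrows (weightsLst : List (List Int)) (inputsLst : List Int) : List (Int × Int × List (Int × Int)) :=
  let st :=
    (PySem.List.pyRange 0 (weightsLst.length : Int) 1).foldl
      (fun (st : PySem.Dict (Int × Int) (List (Int × Int)) × Int) i =>
        let row := PySem.List.pyGetD weightsLst i []
        let d :=
          (PySem.List.pyRange 0 (row.length : Int) 1).foldl
            (fun dict j =>
              dict.insert (i, j) [(i, PySem.Int.mod j st.2), (i + 1, PySem.Int.floordiv j st.2)])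
            st.1
        (d, PySem.Int.floordiv (row.length : Int) st.2))
      (PySem.Dict.empty, (inputsLst.length : Int))
  st.1.items.map (fun p => (p.1.1, p.1.2, p.2))

-- ===== PORT B =====
def setWeightsToArrows_alt (weightsLst : List (List Int)) (inputsLst : List Int) : List (Int × Int × List (Int × Int)) :=
  let st :=
    (PySem.List.enumerate weightsLst 0).foldl
      (fun (st : PySem.Dict (Int × Int) (List (Int × Int)) × Int) p =>
        let i := p.1
        let row := p.2
        let q := PySem.Int.floordiv (row.length : Int) st.2
        let r := (row.length : Int) - q * st.2
        let dFull :=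
          (PySem.List.pyRange 0 q 1).foldl
            (fun dct b =>
              (PySem.List.pyRange 0 st.2 1).foldl
                (fun dct2 a => dct2.insert (i, b * st.2 + a) [(i, a), (i + 1, b)]) dct)
            st.1
        let dTail :=
          (PySem.List.pyRange 0 r 1).foldl
            (fun dct a => dct.insert (i, q * st.2 + a) [(i, a), (i + 1, q)]) dFull
        (dTail, q))
      (PySem.Dict.empty, (inputsLst.length : Int))
  st.1.items.map (fun p => (p.1.1, p.1.2, p.2))

-- ===== PRECONDITION & SPEC =====
-- chain of the divisors the Python uses: d0 = len(inputsLst), d_{k+1} = len(w_k) // d_k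
def pvChain (rows : List Int) (d : Int) : List Int :=
  match rows with
  | [] => []
  | r :: rest => d :: pvChain rest (PySem.Int.floordiv r d)

-- Pre_ excludes exactly the inputs where the Python A raises ZeroDivisionError: some divisor in
-- the length recurrence becomes 0 before the loop is done (a closed-form condition on lengths only).
def Pre_setWeightsToArrows (weightsLst : List (List Int)) (inputsLst : List Int) : Prop :=
  ∀ d ∈ pvChain (weightsLst.map (fun r => (r.length : Int))) (inputsLst.length : Int), d ≠ 0

instance (weightsLst : List (List Int)) (inputsLst : List Int) : Decidable (Pre_setWeightsToArrows weightsLst inputsLst) := by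
  unfold Pre_setWeightsToArrows; infer_instance

def pvWitness_setWeightsToArrows : List (List Int) × List Int := ([[1, 2, 3, 4], [5, 6]], [7, 8])

def Spec_setWeightsToArrows (weightsLst : List (List Int)) (inputsLst : List Int) (out : List (Int × Int × List (Int × Int))) : Prop := out = setWeightsToArrows_alt weightsLst inputsLst
instance (weightsLst : List (List Int)) (inputsLst : List Int) (out : List (Int × Int × List (Int × Int))) : Decidable (Spec_setWeightsToArrows weightsLst inputsLst out) := by unfold Spec_setWeightsToArrows; infer_instance

-- ===== CLAIM (what is proved, stated in full; the proofs are below) =====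
def Claim_equal_setWeightsToArrows : Prop := ∀ (weightsLst : List (List Int)) (inputsLst : List Int), Dom_setWeightsToArrows weightsLst inputsLst → Pre_setWeightsToArrows weightsLst inputsLst → Spec_setWeightsToArrows weightsLst inputsLst (setWeightsToArrows weightsLst inputsLst)

-- ===== LEMMAS AND PROOFS =====

-- range(q*d) is q blocks of size d
theorem range_mul_split (q d : Nat) :
    List.range (q * d) = (List.range q).flatMap (fun b => (List.range d).map (fun a => b * d + a)) := by
  induction q with
  | zero => simp
  | succ q ih =>
    rw [Nat.succ_mul, List.range_add, ih, List.range_succ, List.flatMap_append]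
    simp

-- range(L) splits into the full blocks of size d plus the partial final block
theorem pvRange_split (L : Nat) (d : Int) (hd : 0 < d) :
    PySem.List.pyRange 0 (L : Int) 1
      = (PySem.List.pyRange 0 (PySem.Int.floordiv (L : Int) d) 1).flatMap
          (fun b => (PySem.List.pyRange 0 d 1).map (fun a => b * d + a))
        ++ (PySem.List.pyRange 0 ((L : Int) - PySem.Int.floordiv (L : Int) d * d) 1).map
          (fun a => PySem.Int.floordiv (L : Int) d * d + a) := by
  obtain ⟨dn, rfl⟩ : ∃ dn : Nat, d = (dn : Int) := ⟨d.toNat, (Int.toNat_of_nonneg hd.le).symm⟩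
  have hdn : 0 < dn := by exact_mod_cast hd
  rw [PySem.Int.floordiv_natCast]
  have h : (L / dn * dn + L % dn : Nat) = L := Nat.div_add_mod' L dn
  have h2 : ((L / dn : Nat) : Int) * (dn : Int) + ((L % dn : Nat) : Int) = (L : Int) := by
    exact_mod_cast h
  have hsub : (L : Int) - ((L / dn : Nat) : Int) * (dn : Int) = ((L % dn : Nat) : Int) := by
    linarith
  rw [hsub]
  rw [PySem.List.pyRange_one 0 (L : Int), PySem.List.pyRange_one 0 ((L / dn : Nat) : Int),
      PySem.List.pyRange_one 0 (dn : Int), PySem.List.pyRange_one 0 ((L % dn : Nat) : Int)]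
  simp only [sub_zero, Int.toNat_natCast, zero_add]
  have key : List.range L
      = (List.range (L / dn)).flatMap (fun b => (List.range dn).map (fun a => b * dn + a))
        ++ (List.range (L % dn)).map (fun x => L / dn * dn + x) := by
    conv_lhs => rw [← h]
    rw [List.range_add, range_mul_split]
  rw [key, List.map_append]
  congr 1
  · rw [List.map_flatMap, List.flatMap_map]
    apply List.flatMap_congr
    intro b _
    simp only [List.map_map]
    apply List.map_congr_left
    intro a _
    simp only [Function.comp_apply]
    push_cast
    ring
  · rw [List.map_map, List.map_map]
    apply List.map_congr_left
    intro a _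
    simp only [Function.comp_apply]
    push_cast
    ring

-- A's per-row fold (divide every index) equals B's per-row fold (enumerate the blocks)
theorem pvRowEq (i d : Int) (hd : 0 < d) (row : List Int)
    (acc : PySem.Dict (Int × Int) (List (Int × Int))) :
    (PySem.List.pyRange 0 (row.length : Int) 1).foldl
      (fun dict j =>
        dict.insert (i, j) [(i, PySem.Int.mod j d), (i + 1, PySem.Int.floordiv j d)]) acc
    = (PySem.List.pyRange 0 ((row.length : Int) - PySem.Int.floordiv (row.length : Int) d * d) 1).foldl
        (fun dct a => dct.insert (i, PySem.Int.floordiv (row.length : Int) d * d + a)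
          [(i, a), (i + 1, PySem.Int.floordiv (row.length : Int) d)])
        ((PySem.List.pyRange 0 (PySem.Int.floordiv (row.length : Int) d) 1).foldl
          (fun dct b =>
            (PySem.List.pyRange 0 d 1).foldl
              (fun dct2 a => dct2.insert (i, b * d + a) [(i, a), (i + 1, b)]) dct)
          acc) := by
  rw [pvRange_split row.length d hd, List.foldl_append, List.foldl_flatMap]
  -- blocks part
  have hblocks : ∀ acc0 : PySem.Dict (Int × Int) (List (Int × Int)),
      (PySem.List.pyRange 0 (PySem.Int.floordiv (row.length : Int) d) 1).foldl
        (fun acc1 b => ((PySem.List.pyRange 0 d 1).map (fun a => b * d + a)).foldl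
          (fun dict j => dict.insert (i, j) [(i, PySem.Int.mod j d), (i + 1, PySem.Int.floordiv j d)]) acc1) acc0
      = (PySem.List.pyRange 0 (PySem.Int.floordiv (row.length : Int) d) 1).foldl
        (fun dct b => (PySem.List.pyRange 0 d 1).foldl
          (fun dct2 a => dct2.insert (i, b * d + a) [(i, a), (i + 1, b)]) dct) acc0 := by
    intro acc0
    apply PySem.List.foldl_congr_mem
    intro acc1 b hb
    rw [List.foldl_map]
    apply PySem.List.foldl_congr_mem
    intro dct a ha
    rw [PySem.List.mem_pyRange_one] at ha
    have hmod : PySem.Int.mod (b * d + a) d = a := by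
      rw [PySem.Int.mod_eq_emod_of_pos hd]
      rw [add_comm, Int.add_mul_emod_self_right]
      exact Int.emod_eq_of_lt ha.1 ha.2
    have hdiv : PySem.Int.floordiv (b * d + a) d = b := by
      rw [PySem.Int.floordiv_eq_ediv_of_pos hd]
      rw [add_comm, Int.add_mul_ediv_right _ _ hd.ne']
      rw [Int.ediv_eq_zero_of_lt ha.1 ha.2, zero_add]
    rw [hmod, hdiv]
  rw [hblocks]
  -- tail part
  rw [List.foldl_map]
  apply PySem.List.foldl_congr_mem
  intro dct a ha
  rw [PySem.List.mem_pyRange_one] at ha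
  have hrlt : (row.length : Int) - PySem.Int.floordiv (row.length : Int) d * d < d := by
    have h1 := PySem.Int.floordiv_mul_add_mod (row.length : Int) d
    have h2 := PySem.Int.mod_lt (a := (row.length : Int)) hd
    omega
  have hmod : PySem.Int.mod (PySem.Int.floordiv (row.length : Int) d * d + a) d = a := by
    rw [PySem.Int.mod_eq_emod_of_pos hd, add_comm, Int.add_mul_emod_self_right]
    exact Int.emod_eq_of_lt ha.1 (lt_of_lt_of_le ha.2 (by omega))
  have hdiv : PySem.Int.floordiv (PySem.Int.floordiv (row.length : Int) d * d + a) d = PySem.Int.floordiv (row.length : Int) d := by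
    rw [PySem.Int.floordiv_eq_ediv_of_pos hd, add_comm, Int.add_mul_ediv_right _ _ hd.ne']
    rw [Int.ediv_eq_zero_of_lt ha.1 (lt_of_lt_of_le ha.2 (by omega)), zero_add]
  rw [hmod, hdiv]

-- the two main loops, aligned on the common index range, reach the same state
theorem pvMainLoop (W : List (List Int)) : ∀ (w pre : List (List Int)), W = pre ++ w →
    ∀ (acc : PySem.Dict (Int × Int) (List (Int × Int))) (d : Int), 0 ≤ d →
    (∀ x ∈ pvChain (w.map (fun r => (r.length : Int))) d, x ≠ 0) →
    (PySem.List.pyRange (pre.length : Int) (W.length : Int) 1).foldl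
      (fun (st : PySem.Dict (Int × Int) (List (Int × Int)) × Int) i =>
        let row := PySem.List.pyGetD W i []
        let d :=
          (PySem.List.pyRange 0 (row.length : Int) 1).foldl
            (fun dict j =>
              dict.insert (i, j) [(i, PySem.Int.mod j st.2), (i + 1, PySem.Int.floordiv j st.2)])
            st.1
        (d, PySem.Int.floordiv (row.length : Int) st.2)) (acc, d)
    = (PySem.List.pyRange (pre.length : Int) (W.length : Int) 1).foldl
      (fun (st : PySem.Dict (Int × Int) (List (Int × Int)) × Int) i =>
        let row := PySem.List.pyGetD W i []
        let q := PySem.Int.floordiv (row.length : Int) st.2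
        let r := (row.length : Int) - q * st.2
        let dFull :=
          (PySem.List.pyRange 0 q 1).foldl
            (fun dct b =>
              (PySem.List.pyRange 0 st.2 1).foldl
                (fun dct2 a => dct2.insert (i, b * st.2 + a) [(i, a), (i + 1, b)]) dct)
            st.1
        let dTail :=
          (PySem.List.pyRange 0 r 1).foldl
            (fun dct a => dct.insert (i, q * st.2 + a) [(i, a), (i + 1, q)]) dFull
        (dTail, q)) (acc, d) := by
  intro w
  induction w with
  | nil =>
    intro pre hW acc d _ _
    rw [PySem.List.pyRange_one_eq_nil (by simp [hW])]
    rfl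
  | cons r rest ih =>
    intro pre hW acc d hd0 hchain
    have hlen : (pre.length : Int) < (W.length : Int) := by
      subst hW
      exact_mod_cast (by simp : pre.length < (pre ++ r :: rest).length)
    rw [PySem.List.pyRange_one_cons hlen, List.foldl_cons, List.foldl_cons]
    have hrow : PySem.List.pyGetD W ((pre.length : Nat) : Int) ([] : List Int) = r := by
      subst hW
      rw [PySem.List.pyGetD_natCast]
      simp [List.getD_eq_getElem?_getD]
    dsimp only
    rw [hrow]
    have hdne : d ≠ 0 := hchain d (by simp [pvChain])
    have hd : 0 < d := lt_of_le_of_ne hd0 (Ne.symm hdne)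
    rw [pvRowEq ((pre.length : Nat) : Int) d hd r acc]
    have hstep : ((pre ++ [r]).length : Int) = (pre.length : Int) + 1 := by simp
    have hd0' : 0 ≤ PySem.Int.floordiv (r.length : Int) d := by
      rw [PySem.Int.floordiv_eq_ediv_of_pos hd]
      exact Int.ediv_nonneg (by positivity) hd.le
    have hchain' : ∀ x ∈ pvChain (rest.map (fun r => (r.length : Int)))
        (PySem.Int.floordiv (r.length : Int) d), x ≠ 0 := by
      intro x hx
      exact hchain x (by simp [pvChain] at hx ⊢; right; exact hx)
    have := ih (pre ++ [r]) (by simp [hW])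
      ((PySem.List.pyRange 0 ((r.length : Int) - PySem.Int.floordiv (r.length : Int) d * d) 1).foldl
        (fun dct a => dct.insert (((pre.length : Nat) : Int), PySem.Int.floordiv (r.length : Int) d * d + a)
          [(((pre.length : Nat) : Int), a), (((pre.length : Nat) : Int) + 1, PySem.Int.floordiv (r.length : Int) d)])
        ((PySem.List.pyRange 0 (PySem.Int.floordiv (r.length : Int) d) 1).foldl
          (fun dct b =>
            (PySem.List.pyRange 0 d 1).foldl
              (fun dct2 a => dct2.insert (((pre.length : Nat) : Int), b * d + a)
                [(((pre.length : Nat) : Int), a), (((pre.length : Nat) : Int) + 1, b)]) dct)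
          acc))
      (PySem.Int.floordiv (r.length : Int) d) hd0' hchain'
    rw [hstep] at this
    exact this

-- ===== VERDICT (by name: the statement is the Claim_ definition above) =====
theorem setWeightsToArrows_spec : Claim_equal_setWeightsToArrows := by
  unfold Claim_equal_setWeightsToArrows
  intro w inp _ hpre
  unfold Spec_setWeightsToArrows setWeightsToArrows setWeightsToArrows_alt
  rw [PySem.List.enumerate_eq_map_pyRange (xs := w) (d := ([] : List Int)), List.foldl_map]
  have hmain := pvMainLoop w w [] rfl PySem.Dict.empty (inp.length : Int) (by positivity) hpre
  simp only [List.length_nil, Nat.cast_zero] at hmain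
  dsimp only
  rw [hmain]
  simp only [PySem.List.len_eq]
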